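-- pv_equiv track=rewrite | github.com/Dvorachek/CSC361 | a1/SmartClient.py | locate
-- ===== SOURCE A (Python) =====
-- def locate(response):
--     response = response.split('\n')
--     location = ''
--     for line in response:
--         if line[:10] == 'Location: ':
--             location = line[10:]
--             break
--
--     return location
-- ===== SOURCE B (Python) =====
-- def locate(response):
--     i = response.find('\n')
--     head = response if i == -1 else response[:i]
--     if head.startswith('Location: '):
--         return head[10:]
--     return '' if i == -1 else locate(response[i + 1:])
-- ===== Notes on version B (the rewrite author's own statement) =====
-- stated objective: alternative
-- what changed: Instead of materializing the full list of lines and scanning it with a ten-character prefix test, B recursively walks the raw string, using str.find to locate each newline, slicing out one line at a time and stopping at the first line carrying the header prefix.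
import Mathlib
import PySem

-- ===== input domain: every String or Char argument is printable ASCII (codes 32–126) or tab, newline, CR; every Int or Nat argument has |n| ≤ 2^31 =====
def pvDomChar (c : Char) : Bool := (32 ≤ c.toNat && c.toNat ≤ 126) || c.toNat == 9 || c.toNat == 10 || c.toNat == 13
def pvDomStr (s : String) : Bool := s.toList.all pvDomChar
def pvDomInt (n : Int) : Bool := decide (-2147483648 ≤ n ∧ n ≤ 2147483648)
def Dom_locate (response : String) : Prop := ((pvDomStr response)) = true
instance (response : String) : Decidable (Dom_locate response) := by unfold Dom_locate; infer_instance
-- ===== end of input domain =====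

-- B replaces A's split-into-lines-then-scan with a recursive find-based walk over the raw string; neither mutates its argument.

-- ===== PORT A =====
-- 'location = ""; for line in lines: if line[:10] == "Location: ": location = line[10:]; break'
def locateGo : List (List Char) → List Char
  | [] => []
  | line :: rest =>
    if PySem.Chars.slice line none (some 10) = "Location: ".toList then
      PySem.Chars.slice line (some 10) none
    else locateGo rest

def locate (response : String) : String :=
  String.ofList (locateGo (PySem.Chars.splitOn response.toList ['\n']))

-- ===== PORT B =====
def locateAltGo (s : List Char) : List Char :=
  let i := PySem.Chars.find s ['\n']
  let head := if i = -1 then s else PySem.Chars.slice s none (some i)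
  if PySem.Chars.startswith head "Location: ".toList then
    PySem.Chars.slice head (some 10) none
  else if h : i = -1 then [] else locateAltGo (PySem.Chars.slice s (some (i + 1)) none)
termination_by s.length
decreasing_by
  have h0 : (0:Int) ≤ PySem.Chars.find s ['\n'] := by
    have := PySem.Chars.neg_one_le_find s ['\n']
    omega
  have hinf : ['\n'] <:+: s := (PySem.Chars.find_nonneg_iff s ['\n']).mp h0
  have hlen : 1 ≤ s.length := by simpa using hinf.length_le
  rw [PySem.Chars.slice_eq_listSlice,
      PySem.List.slice_from s (show (0:Int) ≤ PySem.Chars.find s ['\n'] + 1 by omega)]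
  simp only [List.length_drop]
  omega


def locate_alt (response : String) : String :=
  String.ofList (locateAltGo response.toList)

-- ===== PRECONDITION & SPEC =====
def Spec_locate (response : String) (out : String) : Prop := out = locate_alt response
instance (response : String) (out : String) : Decidable (Spec_locate response out) := by unfold Spec_locate; infer_instance

-- ===== CLAIM (what is proved, stated in full; the proofs are below) =====
def Claim_equal_locate : Prop := ∀ (response : String), Dom_locate response → Spec_locate response (locate response)

-- ===== LEMMAS AND PROOFS =====

lemma go_no_nl (fuel : Nat) (l cur : List Char) (acc : List (List Char))
    (h : '\n' ∉ l) :
    PySem.Chars.splitOn.go ['\n'] fuel l cur acc = acc.reverse ++ [cur.reverse ++ l] := by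
  induction fuel generalizing l cur with
  | zero => simp [PySem.Chars.splitOn.go]
  | succ f ih =>
    cases l with
    | nil => simp [PySem.Chars.splitOn.go]
    | cons c rest =>
      have hc : c ≠ '\n' := fun hc => h (hc ▸ List.mem_cons_self)
      have hpre : (['\n'].isPrefixOf (c :: rest)) = false := by
        simp [List.isPrefixOf]; exact fun h' => absurd h'.symm hc
      rw [PySem.Chars.splitOn.go]
      simp only [hpre, Bool.false_eq_true, if_false]
      rw [ih rest (c :: cur) (fun hm => h (List.mem_cons_of_mem _ hm))]
      simp

lemma go_acc (fuel : Nat) (l cur : List Char) (acc : List (List Char)) :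
    PySem.Chars.splitOn.go ['\n'] fuel l cur acc
      = acc.reverse ++ PySem.Chars.splitOn.go ['\n'] fuel l cur [] := by
  induction fuel generalizing l cur acc with
  | zero => simp [PySem.Chars.splitOn.go]
  | succ f ih =>
    cases l with
    | nil => simp [PySem.Chars.splitOn.go]
    | cons c rest =>
      rw [PySem.Chars.splitOn.go, PySem.Chars.splitOn.go]
      by_cases hpre : (['\n'].isPrefixOf (c :: rest)) = true
      · simp only [hpre, if_true]
        rw [ih _ _ (cur.reverse :: acc), ih _ _ ([cur.reverse])]
        simp
      · simp only [hpre]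
        exact ih rest (c :: cur) acc

lemma go_with_nl (a : List Char) (fuel : Nat) (b cur : List Char) (acc : List (List Char))
    (ha : '\n' ∉ a) (hfuel : a.length < fuel) :
    PySem.Chars.splitOn.go ['\n'] fuel (a ++ '\n' :: b) cur acc
      = PySem.Chars.splitOn.go ['\n'] (fuel - (a.length + 1)) b [] ((cur.reverse ++ a) :: acc) := by
  induction a generalizing fuel cur with
  | nil =>
    obtain ⟨f, rfl⟩ : ∃ f, fuel = f + 1 := ⟨fuel - 1, by omega⟩
    rw [List.nil_append, PySem.Chars.splitOn.go]
    simp [List.isPrefixOf]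
  | cons c a' ih =>
    obtain ⟨f, rfl⟩ : ∃ f, fuel = f + 1 := ⟨fuel - 1, by omega⟩
    have hc : c ≠ '\n' := fun hc => ha (hc ▸ List.mem_cons_self)
    have hpre : (['\n'].isPrefixOf (c :: (a' ++ '\n' :: b))) = false := by
      simp [List.isPrefixOf]; exact fun h' => absurd h'.symm hc
    rw [List.cons_append, PySem.Chars.splitOn.go]
    simp only [hpre, Bool.false_eq_true, if_false]
    rw [ih f (c :: cur) (fun hm => ha (List.mem_cons_of_mem _ hm)) (by simpa using hfuel)]
    have hf : f - (a'.length + 1) = f + 1 - ((c :: a').length + 1) := by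
      simp only [List.length_cons]; omega
    have hx : (c :: cur).reverse ++ a' = cur.reverse ++ (c :: a') := by simp
    rw [hf, hx]

lemma infix_iff_mem_local {c : Char} {s : List Char} : [c] <:+: s ↔ c ∈ s := by
  constructor
  · intro ⟨l, r, h⟩; subst h; simp
  · intro hm
    obtain ⟨l, r, rfl⟩ := List.append_of_mem hm
    exact ⟨l, r, by simp⟩

lemma splitOn_of_find_neg (s : List Char) (h : PySem.Chars.find s ['\n'] = -1) :
    PySem.Chars.splitOn s ['\n'] = [s] := by
  have hni : ¬ ['\n'] <:+: s := (PySem.Chars.find_eq_neg_one_iff s ['\n']).mp h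
  have hmem : '\n' ∉ s := fun hm => hni (infix_iff_mem_local.mpr hm)
  unfold PySem.Chars.splitOn
  rw [go_no_nl _ _ _ _ hmem]
  simp

lemma splitOn_of_find_nonneg (s : List Char) (h : 0 ≤ PySem.Chars.find s ['\n']) :
    PySem.Chars.splitOn s ['\n']
      = s.take (PySem.Chars.find s ['\n']).toNat
        :: PySem.Chars.splitOn (s.drop ((PySem.Chars.find s ['\n']).toNat + 1)) ['\n'] := by
  set i := (PySem.Chars.find s ['\n']).toNat with hi
  obtain ⟨hpre, hmin⟩ := PySem.Chars.find_spec h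
  have hlt : i < s.length := by
    by_contra hge
    have : s.drop i = [] := List.drop_eq_nil_of_le (by omega)
    rw [this] at hpre
    simpa using hpre.length_le
  have hd1 : s.drop i = s[i] :: s.drop (i + 1) := List.drop_eq_getElem_cons hlt
  have h2 : s[i] = '\n' := by
    obtain ⟨t, ht⟩ := hpre
    rw [hd1] at ht
    exact (List.cons.injEq _ _ _ _ ▸ ht :) |>.1.symm
  have hsplit : s = s.take i ++ '\n' :: s.drop (i + 1) := by
    conv_lhs => rw [← List.take_append_drop i s]
    rw [hd1, h2]
  have hnotin : '\n' ∉ s.take i := by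
    intro hm
    obtain ⟨j, hj, hget⟩ := List.getElem_of_mem hm
    have hjlt : j < i := by simp at hj; omega
    refine hmin j hjlt ⟨s.drop (j + 1), ?_⟩
    have hg : s[j] = '\n' := by
      rw [List.getElem_take] at hget; exact hget
    rw [← hg, List.singleton_append, ← List.drop_eq_getElem_cons (show j < s.length by omega)]
  have hlena : (s.take i).length = i := by simp; omega
  calc PySem.Chars.splitOn s ['\n']
      = PySem.Chars.splitOn.go ['\n'] (s.length + 1) (s.take i ++ '\n' :: s.drop (i + 1)) [] [] := by
        rw [PySem.Chars.splitOn]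
        conv_lhs => rw [hsplit]
        rw [← hsplit]
    _ = PySem.Chars.splitOn.go ['\n'] (s.length + 1 - (i + 1)) (s.drop (i + 1)) [] [s.take i] := by
        rw [go_with_nl _ _ _ _ _ hnotin (by omega)]
        simp [hlena]
    _ = s.take i :: PySem.Chars.splitOn (s.drop (i + 1)) ['\n'] := by
        rw [go_acc]
        have : s.length + 1 - (i + 1) = (s.drop (i + 1)).length + 1 := by
          simp; omega
        rw [this, PySem.Chars.splitOn]
        simp

-- line[:10] == 'Location: '  ↔  line.startswith('Location: ')
lemma cond_eq (l : List Char) :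
    (PySem.Chars.slice l none (some 10) = "Location: ".toList)
      ↔ PySem.Chars.startswith l "Location: ".toList = true := by
  rw [PySem.Chars.startswith_iff, PySem.Chars.slice_eq_listSlice,
      PySem.List.slice_to l (b := 10) (by norm_num)]
  show l.take (Int.toNat 10) = "Location: ".toList ↔ _
  constructor
  · intro h; exact h ▸ List.take_prefix 10 l
  · intro h
    exact (List.prefix_iff_eq_take.mp h).symm

lemma main_go (n : Nat) : ∀ s : List Char, s.length ≤ n →
    locateGo (PySem.Chars.splitOn s ['\n']) = locateAltGo s := by
  induction n with
  | zero =>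
    intro s hs
    have : s = [] := List.eq_nil_of_length_eq_zero (by omega)
    subst this
    rw [splitOn_of_find_neg [] (by decide), locateAltGo]
    decide
  | succ n ih =>
    intro s hs
    rw [locateAltGo]
    by_cases hf : PySem.Chars.find s ['\n'] = -1
    · rw [splitOn_of_find_neg s hf, locateGo, if_pos hf, dif_pos hf]
      by_cases hc : PySem.Chars.startswith s "Location: ".toList = true
      · rw [if_pos ((cond_eq s).mpr hc), if_pos hc]
      · rw [if_neg (fun h => hc ((cond_eq s).mp h)), if_neg hc, locateGo]
    · have h0 : (0:Int) ≤ PySem.Chars.find s ['\n'] := by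
        have := PySem.Chars.neg_one_le_find s ['\n']
        omega
      have hinf : ['\n'] <:+: s := (PySem.Chars.find_nonneg_iff s ['\n']).mp h0
      have hslen : 1 ≤ s.length := by simpa using hinf.length_le
      have hhead : (if PySem.Chars.find s ['\n'] = -1 then s
          else PySem.Chars.slice s none (some (PySem.Chars.find s ['\n'])))
          = s.take (PySem.Chars.find s ['\n']).toNat := by
        rw [if_neg hf, PySem.Chars.slice_eq_listSlice, PySem.List.slice_to s h0]
      have htail : PySem.Chars.slice s (some (PySem.Chars.find s ['\n'] + 1)) none
          = s.drop ((PySem.Chars.find s ['\n']).toNat + 1) := by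
        rw [PySem.Chars.slice_eq_listSlice, PySem.List.slice_from s (by omega)]
        congr 1
        omega
      rw [splitOn_of_find_nonneg s h0, locateGo]
      simp only [hhead, htail, dif_neg hf]
      set a := s.take (PySem.Chars.find s ['\n']).toNat
      by_cases hc : PySem.Chars.startswith a "Location: ".toList = true
      · rw [if_pos ((cond_eq a).mpr hc), if_pos hc]
      · rw [if_neg (fun h => hc ((cond_eq a).mp h)), if_neg hc]
        apply ih
        have hfind_lt : (PySem.Chars.find s ['\n']).toNat < s.length := by
          have hpre := (PySem.Chars.find_spec h0).1
          have := hpre.length_le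
          simp at this
          omega
        simp
        omega

-- ===== VERDICT (by name: the statement is the Claim_ definition above) =====
theorem locate_spec : Claim_equal_locate := by
  intro response _
  unfold Spec_locate locate locate_alt
  rw [main_go response.toList.length response.toList le_rfl]
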